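-- pv_equiv track=rewrite | github.com/DaiseyCode/LocalCalibrationPubExps | localizing/probe/heuristic_vec_gather.py | _compute_line_info
-- ===== SOURCE A (Python) =====
-- from typing import Dict, List, Set, Optional, Tuple
--
-- def _compute_line_info(tokens: List[str]) -> Tuple[List[int], List[int]]:
--     """Compute line boundaries and position-in-line for all tokens."""
--     line_starts = []  # line_starts[i] = line number for token i
--     positions_in_line = []  # positions_in_line[i] = position in line for token i
--
--     current_line = 0
--     position_in_current_line = 0
--
--     for token in tokens:
--         line_starts.append(current_line)
--         positions_in_line.append(position_in_current_line)
--
--         # Count newlines in this token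
--         newline_count = token.count('\n')
--         if newline_count > 0:
--             current_line += newline_count
--             # If token ends with newline, next position is 0
--             # Otherwise, it's the length after last newline
--             lines_in_token = token.split('\n')
--             position_in_current_line = len(lines_in_token[-1])
--         else:
--             position_in_current_line += len(token)
--
--     return line_starts, positions_in_line
-- ===== SOURCE B (Python) =====
-- from typing import Dict, List, Set, Optional, Tuple
--
-- def _compute_line_info(tokens: List[str]) -> Tuple[List[int], List[int]]:
--     """Two-pass alternative: first build the start offset of each token and an
--     index of the absolute positions of all newlines; then derive each token's
--     line (newlines before its start) and column (distance from the last newline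
--     before its start) with a single merge walk over the sorted newline index."""
--     starts = []
--     nl_positions = []
--     offset = 0
--     for token in tokens:
--         starts.append(offset)
--         for j, ch in enumerate(token):
--             if ch == '\n':
--                 nl_positions.append(offset + j)
--         offset += len(token)
--
--     line_starts = []
--     positions_in_line = []
--     k = 0
--     for s in starts:
--         while k < len(nl_positions) and nl_positions[k] < s:
--             k += 1
--         line_starts.append(k)
--         positions_in_line.append(s if k == 0 else s - nl_positions[k - 1] - 1)
--     return line_starts, positions_in_line
-- ===== Notes on version B (the rewrite author's own statement) =====
-- stated objective: alternative
-- what changed: Replaces the single stateful scan threading current line/column through every token with two passes: one pass computes each token's start offset and a sorted index of absolute newline positions, and a second merge walk over that index derives each token's line (newlines before its start) and column (offset since the last such newline).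
import Mathlib
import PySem

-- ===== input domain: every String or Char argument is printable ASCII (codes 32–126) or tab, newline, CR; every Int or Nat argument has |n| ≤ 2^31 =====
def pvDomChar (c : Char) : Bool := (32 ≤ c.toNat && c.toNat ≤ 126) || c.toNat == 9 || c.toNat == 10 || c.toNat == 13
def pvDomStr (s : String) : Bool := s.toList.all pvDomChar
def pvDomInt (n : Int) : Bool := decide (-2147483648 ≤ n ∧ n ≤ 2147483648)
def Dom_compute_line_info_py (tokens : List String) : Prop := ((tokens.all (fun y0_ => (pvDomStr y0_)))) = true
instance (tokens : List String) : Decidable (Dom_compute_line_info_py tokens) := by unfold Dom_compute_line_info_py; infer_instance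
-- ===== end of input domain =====

-- B replaces A's single stateful line/column scan by two passes (token start offsets + a
-- sorted newline-position index, then a merge walk); objective: alternative (same cost).

-- ===== PORT A =====
-- loop body of A's single for-loop; state = (line_starts, positions_in_line, current_line, position_in_current_line)
def pvStepA (st : List Int × List Int × Int × Int) (token : String) : List Int × List Int × Int × Int :=
  let ls := st.1 ++ [st.2.2.1]
  let ps := st.2.1 ++ [st.2.2.2]
  let newline_count := PySem.Str.count token "\n"
  if 0 < newline_count then
    -- token.split('\n'): sep "\n" is nonempty, split? never returns none
    let lines := match PySem.Str.split? token "\n" with | some l => l | none => []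
    -- lines_in_token[-1]: split result is never empty, pyGet? never returns none
    let pc := match PySem.List.pyGet? lines (-1) with | some last => PySem.Str.len last | none => 0
    (ls, ps, st.2.2.1 + (newline_count : Int), pc)
  else
    (ls, ps, st.2.2.1, st.2.2.2 + PySem.Str.len token)

def compute_line_info_py (tokens : List String) : List Int × List Int :=
  let r := tokens.foldl pvStepA ([], [], 0, 0)
  (r.1, r.2.1)

-- ===== PORT B =====
-- first pass of Source B: state = (starts, nl_positions, offset)
def pvStepB1 (st : List Int × List Int × Int) (token : String) : List Int × List Int × Int :=
  let starts := st.1 ++ [st.2.2]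
  let nl := (PySem.List.enumerate token.toList).foldl
      (fun nl jc => if jc.2 == '\n' then nl ++ [st.2.2 + jc.1] else nl) st.2.1
  (starts, nl, st.2.2 + PySem.Str.len token)

-- Source B's 'while k < len(nl_positions) and nl_positions[k] < s: k += 1'
def pvAdvance (nl : List Int) (s : Int) (k : Nat) : Nat :=
  if h : k < nl.length then (if nl[k] < s then pvAdvance nl s (k + 1) else k) else k
termination_by nl.length - k

-- second pass of Source B: state = (k, line_starts, positions_in_line)
def pvStepB2 (nl : List Int) (st : Nat × List Int × List Int) (s : Int) : Nat × List Int × List Int :=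
  let k := pvAdvance nl s st.1
  (k, st.2.1 ++ [(k : Int)],
   -- nl_positions[k-1]: guarded by k > 0, pyGet? never returns none
   st.2.2 ++ [if k = 0 then s
              else s - (match PySem.List.pyGet? nl ((k : Int) - 1) with | some v => v | none => 0) - 1])

def compute_line_info_py_alt (tokens : List String) : List Int × List Int :=
  let fst := tokens.foldl pvStepB1 ([], [], 0)
  let snd := fst.1.foldl (pvStepB2 fst.2.1) (0, [], [])
  (snd.2.1, snd.2.2)
-- ===== PRECONDITION & SPEC =====
def Spec_compute_line_info_py (tokens : List String) (out : List Int × List Int) : Prop := out = compute_line_info_py_alt tokens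
instance (tokens : List String) (out : List Int × List Int) : Decidable (Spec_compute_line_info_py tokens out) := by unfold Spec_compute_line_info_py; infer_instance

-- ===== CLAIM (what is proved, stated in full; the proofs are below) =====
def Claim_equal_compute_line_info_py : Prop := ∀ (tokens : List String), Dom_compute_line_info_py tokens → Spec_compute_line_info_py tokens (compute_line_info_py tokens)

-- ===== LEMMAS AND PROOFS =====

-- positions of '\n' inside a character list (ascending)
def nlPos : List Char → List Nat
  | [] => []
  | c :: t => if c = '\n' then 0 :: (nlPos t).map (· + 1) else (nlPos t).map (· + 1)

-- the suffix after the last '\n' (meaningful when '\n' occurs)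
def afterL : List Char → List Char
  | [] => []
  | _ :: rest => if '\n' ∈ rest then afterL rest else rest

def flatChars (ts : List String) : List Char := (ts.map String.toList).flatten

-- the line / column A has accumulated after consuming the characters P
def lineSpec (P : List Char) : Int := ((nlPos P).length : Int)
def posSpec (P : List Char) : Int :=
  match (nlPos P).getLast? with
  | none => (P.length : Int)
  | some m => (P.length : Int) - (m : Int) - 1

def outSpec (P : List Char) : List String → List Int × List Int
  | [] => ([], [])
  | t :: ts =>
    let r := outSpec (P ++ t.toList) ts
    (lineSpec P :: r.1, posSpec P :: r.2)

def startsSpec (off : Nat) : List String → List Int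
  | [] => []
  | t :: ts => (off : Int) :: startsSpec (off + t.toList.length) ts
theorem nlPos_append (a b : List Char) :
    nlPos (a ++ b) = nlPos a ++ (nlPos b).map (· + a.length) := by
  induction a with
  | nil => simp [nlPos]
  | cons c t ih =>
    simp only [List.cons_append, nlPos, ih, List.map_append, List.map_map]
    split <;> simp [Function.comp_def, Nat.add_comm, Nat.add_assoc, Nat.add_left_comm]

theorem length_nlPos (cs : List Char) : (nlPos cs).length = cs.count '\n' := by
  induction cs with
  | nil => simp [nlPos]
  | cons c t ih =>
    simp only [nlPos]
    split <;> rename_i h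
    · simp [h, ih]
    · rw [List.count_cons_of_ne h]
      simp [ih]

theorem lt_of_mem_nlPos {m : Nat} {cs : List Char} (h : m ∈ nlPos cs) : m < cs.length := by
  induction cs generalizing m with
  | nil => simp [nlPos] at h
  | cons c t ih =>
    by_cases hc : c = '\n'
    · simp only [nlPos, if_pos hc, List.mem_cons] at h
      rcases h with h | h
      · simp [h]
      · simp only [List.mem_map] at h
        obtain ⟨x, hx, rfl⟩ := h
        have := ih hx; simp; omega
    · simp only [nlPos, if_neg hc, List.mem_map] at h
      obtain ⟨x, hx, rfl⟩ := h
      have := ih hx; simp; omega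

theorem nlPos_eq_nil_iff (cs : List Char) : nlPos cs = [] ↔ '\n' ∉ cs := by
  rw [← List.length_eq_zero_iff, length_nlPos, List.count_eq_zero]

theorem count_go_newline (fuel : Nat) (l : List Char) (acc : Nat) (h : l.length ≤ fuel) :
    PySem.Chars.count.go ['\n'] fuel l acc = acc + l.count '\n' := by
  induction fuel generalizing l acc with
  | zero =>
    have : l = [] := by cases l <;> simp_all
    subst this
    simp [PySem.Chars.count.go]
  | succ n ih =>
    cases l with
    | nil => simp [PySem.Chars.count.go]
    | cons c t =>
      simp only [PySem.Chars.count.go]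
      by_cases hc : c = '\n'
      · rw [if_pos (by simp [hc, List.isPrefixOf])]
        simp only [List.length_cons] at h
        simp only [List.length_singleton, List.drop_one, List.tail_cons]
        rw [ih t (acc+1) (by omega)]
        subst hc
        simp [List.count_cons]
        omega
      · rw [if_neg (by simp [List.isPrefixOf]; exact fun hh => hc hh.symm)]
        simp only [List.length_cons] at h
        rw [ih t acc (by omega), List.count_cons_of_ne hc]

theorem chars_count_newline (cs : List Char) : PySem.Chars.count cs ['\n'] = cs.count '\n' := by
  rw [PySem.Chars.count]
  simp only [List.isEmpty_cons, if_false, Bool.false_eq_true]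
  rw [count_go_newline cs.length cs 0 (le_refl _)]
  omega

theorem splitOn_go_newline (fuel : Nat) (l cur : List Char) (acc : List (List Char))
    (h : l.length < fuel) :
    (PySem.Chars.splitOn.go ['\n'] fuel l cur acc).getLast?
      = some (if '\n' ∈ l then afterL l else cur.reverse ++ l) := by
  induction fuel generalizing l cur acc with
  | zero => omega
  | succ n ih =>
    cases l with
    | nil => simp [PySem.Chars.splitOn.go, List.getLast?_reverse]
    | cons c rest =>
      simp only [PySem.Chars.splitOn.go]
      by_cases hc : c = '\n'
      · rw [if_pos (by simp [hc, List.isPrefixOf])]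
        simp only [List.length_singleton, List.drop_one, List.tail_cons]
        rw [ih rest [] _ (by simp at h; omega)]
        subst hc
        simp [afterL]
      · rw [if_neg (by simp [List.isPrefixOf]; exact fun hh => hc hh.symm)]
        rw [ih rest (c :: cur) acc (by simp at h; omega)]
        by_cases hr : '\n' ∈ rest
        · simp [afterL, hr, List.mem_cons]
        · have hl : '\n' ∉ c :: rest := by
            simp only [List.mem_cons, not_or]
            exact ⟨fun hh => hc hh.symm, hr⟩
          simp [afterL, hr, hl]

theorem splitOn_newline_getLast (cs : List Char) (h : '\n' ∈ cs) :
    (PySem.Chars.splitOn cs ['\n']).getLast? = some (afterL cs) := by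
  rw [PySem.Chars.splitOn, splitOn_go_newline _ _ _ _ (by omega), if_pos h]

theorem getLast?_cons_ne_nil {α : Type} (a : α) (l : List α) (h : l ≠ []) :
    (a :: l).getLast? = l.getLast? := by
  rw [List.getLast?_cons, List.getLast?_eq_head?_reverse]
  cases hr : l.reverse with
  | nil => simp at hr; exact absurd hr h
  | cons x xs => simp


theorem afterL_length (cs : List Char) (h : '\n' ∈ cs) (m : Nat)
    (hm : (nlPos cs).getLast? = some m) : (afterL cs).length = cs.length - m - 1 := by
  induction cs generalizing m with
  | nil => simp at h
  | cons c rest ih =>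
    by_cases hr : '\n' ∈ rest
    · have hne : nlPos rest ≠ [] := by rw [ne_eq, nlPos_eq_nil_iff]; simpa using hr
      obtain ⟨m', hm'⟩ : ∃ m', (nlPos rest).getLast? = some m' := by
        cases hx : (nlPos rest).getLast? with
        | none => exact absurd (List.getLast?_eq_none_iff.mp hx) hne
        | some m' => exact ⟨m', rfl⟩
      have hmem : m' ∈ nlPos rest := List.mem_of_getLast? hm'
      have hlt : m' < rest.length := lt_of_mem_nlPos hmem
      have hmapne : (nlPos rest).map (· + 1) ≠ [] := by simpa using hne
      have hlast : ((nlPos rest).map (· + 1)).getLast? = some (m' + 1) := by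
        rw [List.getLast?_map, hm']; rfl
      have hmval : m = m' + 1 := by
        by_cases hc : c = '\n'
        · rw [nlPos, if_pos hc, getLast?_cons_ne_nil _ _ hmapne, hlast] at hm
          exact (Option.some_inj.mp hm).symm
        · rw [nlPos, if_neg hc, hlast] at hm
          exact (Option.some_inj.mp hm).symm
      have := ih hr m' hm'
      rw [afterL, if_pos hr, this, hmval]
      simp only [List.length_cons]
      omega
    · have hc : c = '\n' := by
        rcases List.mem_cons.mp h with h1 | h1
        · exact h1.symm
        · exact absurd h1 hr
      have hnil : nlPos rest = [] := (nlPos_eq_nil_iff rest).mpr hr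
      rw [nlPos, if_pos hc, hnil] at hm
      simp at hm
      rw [afterL, if_neg hr]
      simp [← hm]

theorem lineSpec_append (P t : List Char) :
    lineSpec (P ++ t) = lineSpec P + (t.count '\n' : Int) := by
  simp [lineSpec, nlPos_append, length_nlPos]

theorem posSpec_append_no (P t : List Char) (h : '\n' ∉ t) :
    posSpec (P ++ t) = posSpec P + (t.length : Int) := by
  have hnil : nlPos t = [] := (nlPos_eq_nil_iff t).mpr h
  simp only [posSpec, nlPos_append, hnil, List.map_nil, List.append_nil]
  cases hx : (nlPos P).getLast? with
  | none => simp [List.length_append]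
  | some m => simp only [List.length_append]; push_cast; ring

theorem posSpec_append_yes (P t : List Char) (h : '\n' ∈ t) :
    posSpec (P ++ t) = ((afterL t).length : Int) := by
  have hne : nlPos t ≠ [] := by rw [ne_eq, nlPos_eq_nil_iff]; simpa using h
  obtain ⟨m, hm⟩ : ∃ m, (nlPos t).getLast? = some m := by
    cases hx : (nlPos t).getLast? with
    | none => exact absurd (List.getLast?_eq_none_iff.mp hx) hne
    | some m => exact ⟨m, rfl⟩
  have hlt : m < t.length := lt_of_mem_nlPos (List.mem_of_getLast? hm)
  have hmapne : (nlPos t).map (· + P.length) ≠ [] := by simpa using hne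
  have hlast : (nlPos (P ++ t)).getLast? = some (m + P.length) := by
    rw [nlPos_append, List.getLast?_append_of_ne_nil _ hmapne, List.getLast?_map, hm]; rfl
  rw [posSpec, hlast]
  rw [afterL_length t h m hm]
  simp only [List.length_append]
  push_cast [Nat.sub_sub, Nat.add_comm]
  omega

theorem stepA_spec (P : List Char) (ls ps : List Int) (t : String) :
    pvStepA (ls, ps, lineSpec P, posSpec P) t
      = (ls ++ [lineSpec P], ps ++ [posSpec P], lineSpec (P ++ t.toList), posSpec (P ++ t.toList)) := by
  have hcount : PySem.Str.count t "\n" = t.toList.count '\n' := by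
    rw [PySem.Str.count_eq]
    have : "\n".toList = ['\n'] := by decide
    rw [this, chars_count_newline]
  by_cases hmem : '\n' ∈ t.toList
  · have hpos : 0 < PySem.Str.count t "\n" := by
      rw [hcount]; exact List.count_pos_iff.mpr hmem
    have hsplit : PySem.Str.split? t "\n" = some ((PySem.Chars.splitOn t.toList ['\n']).map String.ofList) := by
      rw [PySem.Str.split?]
      have : "\n".toList = ['\n'] := by decide
      rw [this, PySem.Chars.split?]
      simp
    simp only [pvStepA, hsplit, if_pos hpos]
    rw [PySem.List.pyGet?_neg_one, List.getLast?_map, splitOn_newline_getLast _ hmem]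
    simp only [Option.map_some]
    rw [lineSpec_append, posSpec_append_yes _ _ hmem, hcount]
    simp [PySem.Str.len, String.toList_ofList]
  · have hpos : ¬ 0 < PySem.Str.count t "\n" := by
      rw [hcount]; simp [List.count_eq_zero, hmem]
    simp only [pvStepA, if_neg hpos]
    have hc0 : t.toList.count '\n' = 0 := by simp [List.count_eq_zero, hmem]
    rw [lineSpec_append, posSpec_append_no _ _ hmem, hc0]
    simp [PySem.Str.len]

theorem foldA (ts : List String) (P : List Char) (ls ps : List Int) :
    ts.foldl pvStepA (ls, ps, lineSpec P, posSpec P)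
      = (ls ++ (outSpec P ts).1, ps ++ (outSpec P ts).2,
         lineSpec (P ++ flatChars ts), posSpec (P ++ flatChars ts)) := by
  induction ts generalizing P ls ps with
  | nil => simp [outSpec, flatChars]
  | cons t ts ih =>
    simp only [List.foldl_cons, stepA_spec, ih (P ++ t.toList) _ _, outSpec, flatChars,
      List.map_cons, List.flatten_cons, List.append_assoc, List.cons_append, List.nil_append,
      List.singleton_append]

theorem enumFold (cs : List Char) (base : Int) (start : Int) (acc : List Int) :
    (PySem.List.enumerate cs start).foldl
        (fun nl jc => if jc.2 == '\n' then nl ++ [base + jc.1] else nl) acc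
      = acc ++ (nlPos cs).map (fun (m : Nat) => base + start + (m : Int)) := by
  induction cs generalizing start acc with
  | nil => simp [PySem.List.enumerate, nlPos]
  | cons c t ih =>
    simp only [PySem.List.enumerate, List.foldl_cons]
    by_cases hc : c = '\n'
    · rw [if_pos (by simp [hc]), ih (start + 1)]
      simp only [nlPos, if_pos hc, List.map_cons, List.map_map, List.append_assoc,
        List.singleton_append, Nat.cast_zero, add_zero]
      congr 1
      congr 1
      exact List.map_congr_left (fun m _ => by simp [Function.comp]; push_cast; ring)
    · rw [if_neg (by simp [hc]), ih (start + 1)]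
      simp only [nlPos, if_neg hc, List.map_map]
      congr 1
      exact List.map_congr_left (fun m _ => by simp [Function.comp]; push_cast; ring)

theorem foldB1 (ts : List String) (off : Nat) (starts nl : List Int) :
    ts.foldl pvStepB1 (starts, nl, (off : Int))
      = (starts ++ startsSpec off ts,
         nl ++ (nlPos (flatChars ts)).map (fun (m : Nat) => (off : Int) + (m : Int)),
         ((off + (flatChars ts).length : Nat) : Int)) := by
  induction ts generalizing off starts nl with
  | nil => simp [startsSpec, flatChars, nlPos]
  | cons t ts ih =>
    simp only [List.foldl_cons, pvStepB1, PySem.Str.len_eq]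
    rw [enumFold t.toList (off : Int) 0 nl]
    have hcast : (off : Int) + (t.toList.length : Int) = ((off + t.toList.length : Nat) : Int) := by
      push_cast; ring
    rw [hcast, ih (off + t.toList.length) _ _]
    simp only [flatChars, List.map_cons, List.flatten_cons, startsSpec, nlPos_append,
      Prod.mk.injEq]
    refine ⟨by simp, ?_, ?_⟩
    · simp only [List.map_append, List.map_map, List.append_assoc, add_zero]
      congr 1
      congr 1
      all_goals
        exact List.map_congr_left (fun m _ => by
          first
          | (simp only [Function.comp_apply]; push_cast; ring)
          | (push_cast; ring))
    · simp only [List.length_append]; push_cast; ring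

theorem nlF_get?_left (P R : List Char) (k : Nat) (hk : k < (nlPos P).length) :
    ((nlPos (P ++ R)).map (fun (m : Nat) => (m : Int)))[k]? = some (((nlPos P)[k] : Nat) : Int) := by
  rw [List.getElem?_map, nlPos_append, List.getElem?_append_left hk,
    List.getElem?_eq_getElem hk]
  rfl

theorem nlF_getElem_left (P R : List Char) (k : Nat) (hk : k < (nlPos P).length)
    (h : k < ((nlPos (P ++ R)).map (fun (m : Nat) => (m : Int))).length) :
    ((nlPos (P ++ R)).map (fun (m : Nat) => (m : Int)))[k] = (((nlPos P)[k] : Nat) : Int) := by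
  have h2 := nlF_get?_left P R k hk
  rw [List.getElem?_eq_getElem h] at h2
  exact Option.some.inj h2

theorem nlF_length (P R : List Char) :
    ((nlPos (P ++ R)).map (fun (m : Nat) => (m : Int))).length
      = (nlPos P).length + (nlPos R).length := by
  simp [nlPos_append]

theorem advance_eq (P R : List Char) (k : Nat) (hk : k ≤ (nlPos P).length) :
    pvAdvance ((nlPos (P ++ R)).map (fun (m : Nat) => (m : Int))) ((P.length : Nat) : Int) k
      = (nlPos P).length := by
  induction hn : (nlPos P).length - k generalizing k with
  | zero =>
    have hke : k = (nlPos P).length := by omega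
    subst hke
    rw [pvAdvance]
    split
    · rename_i hlt
      have hR0 : 0 < (nlPos R).length := by
        have := nlF_length P R
        omega
      have hval : ((nlPos (P ++ R)).map (fun (m : Nat) => (m : Int)))[(nlPos P).length]'hlt
          = (((nlPos R)[0]'hR0 + P.length : Nat) : Int) := by
        have h2 : ((nlPos (P ++ R)).map (fun (m : Nat) => (m : Int)))[(nlPos P).length]?
            = some (((nlPos R)[0]'hR0 + P.length : Nat) : Int) := by
          rw [List.getElem?_map, nlPos_append, List.getElem?_append_right (le_refl _),
            Nat.sub_self, List.getElem?_map, List.getElem?_eq_getElem hR0]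
          rfl
        rw [List.getElem?_eq_getElem hlt] at h2
        exact Option.some.inj h2
      rw [if_neg]
      rw [hval]
      push_cast
      omega
    · rfl
  | succ n ihn =>
    have hklt : k < (nlPos P).length := by omega
    rw [pvAdvance]
    have hlen : k < ((nlPos (P ++ R)).map (fun (m : Nat) => (m : Int))).length := by
      rw [nlF_length]; omega
    rw [dif_pos hlen, if_pos]
    · exact ihn (k + 1) (by omega) (by omega)
    · rw [nlF_getElem_left P R k hklt hlen]
      have hmem : (nlPos P)[k] ∈ nlPos P := List.getElem_mem _
      have := lt_of_mem_nlPos hmem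
      push_cast
      omega

theorem stepB2_spec (P R : List Char) (k : Nat) (ls ps : List Int) (hk : k ≤ (nlPos P).length) :
    pvStepB2 ((nlPos (P ++ R)).map (fun (m : Nat) => (m : Int))) (k, ls, ps) ((P.length : Nat) : Int)
      = ((nlPos P).length, ls ++ [lineSpec P], ps ++ [posSpec P]) := by
  simp only [pvStepB2, advance_eq P R k hk, Prod.mk.injEq]
  refine ⟨trivial, by simp [lineSpec], ?_⟩
  congr 1
  by_cases h0 : (nlPos P).length = 0
  · rw [if_pos h0]
    have : nlPos P = [] := List.length_eq_zero_iff.mp h0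
    simp [posSpec, this]
  · rw [if_neg h0]
    have hne : nlPos P ≠ [] := by intro h; exact h0 (by simp [h])
    have hidx : ((nlPos P).length : Int) - 1 = (((nlPos P).length - 1 : Nat) : Int) := by omega
    have hlt1 : (nlPos P).length - 1 < (nlPos P).length := by omega
    have hget : PySem.List.pyGet? ((nlPos (P ++ R)).map (fun (m : Nat) => (m : Int)))
        (((nlPos P).length : Int) - 1) = some (((nlPos P).getLast hne : Nat) : Int) := by
      rw [hidx, PySem.List.pyGet?_natCast, nlF_get?_left P R _ hlt1]
      congr 2
      exact (List.getLast_eq_getElem hne).symm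
    rw [hget]
    have hmem : (nlPos P).getLast hne ∈ nlPos P := List.getLast_mem hne
    have hlast : (nlPos P).getLast? = some ((nlPos P).getLast hne) := List.getLast?_eq_some_getLast hne
    have hltP := lt_of_mem_nlPos hmem
    simp only [posSpec, hlast]

theorem foldB2 (ts : List String) (F R : List Char) :
    ∀ (P : List Char) (k : Nat) (ls ps : List Int),
      F = P ++ flatChars ts ++ R → k ≤ (nlPos P).length →
    (startsSpec P.length ts).foldl (pvStepB2 ((nlPos F).map (fun (m : Nat) => (m : Int)))) (k, ls, ps)
      = ((if ts = [] then k else (nlPos (P ++ flatChars ts.dropLast)).length),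
         ls ++ (outSpec P ts).1, ps ++ (outSpec P ts).2) := by
  induction ts with
  | nil => intro P k ls ps hF hk; simp [startsSpec, outSpec]
  | cons t ts ih =>
    intro P k ls ps hF hk
    have hF2 : F = P ++ (t.toList ++ (flatChars ts ++ R)) := by
      simp only [hF, flatChars, List.map_cons, List.flatten_cons, List.append_assoc]
    simp only [startsSpec, List.foldl_cons]
    rw [show ((P.length : Nat) : Int) = ((P.length : Nat) : Int) from rfl]
    rw [hF2, stepB2_spec P (t.toList ++ (flatChars ts ++ R)) k ls ps hk]
    have hP' : P.length + t.toList.length = (P ++ t.toList).length := by simp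
    have hF' : F = (P ++ t.toList) ++ flatChars ts ++ R := by
      rw [hF2]; simp [List.append_assoc]
    have hk' : (nlPos P).length ≤ (nlPos (P ++ t.toList)).length := by
      simp [nlPos_append]
    rw [← hF2, hP']
    rw [ih (P ++ t.toList) ((nlPos P).length) _ _ hF' hk']
    simp only [outSpec, List.append_assoc, List.singleton_append]
    by_cases hts : ts = []
    · subst hts
      simp [flatChars, outSpec]
    · rw [if_neg hts, if_neg (by simp)]
      have : (t :: ts).dropLast = t :: ts.dropLast := List.dropLast_cons_of_ne_nil hts
      rw [this]
      simp [flatChars, List.append_assoc]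

-- ===== VERDICT (by name: the statement is the Claim_ definition above) =====
theorem compute_line_info_py_spec : Claim_equal_compute_line_info_py := by
  intro tokens _
  unfold Spec_compute_line_info_py compute_line_info_py compute_line_info_py_alt
  have hA0 : (([], [], 0, 0) : List Int × List Int × Int × Int)
      = ([], [], lineSpec [], posSpec []) := by simp [lineSpec, posSpec, nlPos]
  have hB1 := foldB1 tokens 0 [] []
  simp only [Nat.cast_zero, zero_add, List.nil_append] at hB1
  have hB2 := foldB2 tokens (flatChars tokens) [] [] 0 [] [] (by simp) (by simp)
  simp only [List.length_nil, List.nil_append] at hB2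
  rw [hA0, foldA tokens [] [] [], hB1]
  simp only [hB2]
  simp
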